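-- pv_equiv track=rewrite | github.com/sudiptarafdar7-spec/PHD-Capital-Rationale-Studio-Ready | backend/pipeline/transcript/step05_extract_analysis.py | parse_analysis_response
-- ===== SOURCE A (Python) =====
-- def parse_analysis_response(result):
--     """Parse the GPT response to extract analysis and chart type"""
--     analysis = ""
--     chart_type = "DAILY"
--
--     lines = result.split('\n')
--     for line in lines:
--         line_stripped = line.strip()
--         if line_stripped.upper().startswith('ANALYSIS:'):
--             analysis = line_stripped[9:].strip()
--         elif line_stripped.upper().startswith('CHART_TYPE:'):
--             chart_type_raw = line_stripped[11:].strip().upper()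
--             if chart_type_raw in ['DAILY', 'WEEKLY', 'MONTHLY']:
--                 chart_type = chart_type_raw
--
--     if not analysis:
--         for line in lines:
--             if 'NOT FOUND' in line.upper():
--                 return "NOT FOUND", "DAILY"
--         analysis = result
--
--     return analysis, chart_type
-- ===== SOURCE B (Python) =====
-- def parse_analysis_response(result):
--     """Backward early-exit scans: last-match-wins becomes first match over the
--     reversed lines, found once each, instead of A's overwriting forward fold."""
--     lines = result.split('\n')
--
--     analysis = ""
--     for line in reversed(lines):
--         ls = line.strip()
--         if ls.upper().startswith('ANALYSIS:'):
--             analysis = ls[9:].strip()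
--             break
--
--     chart_type = "DAILY"
--     for line in reversed(lines):
--         ls = line.strip()
--         if ls.upper().startswith('CHART_TYPE:'):
--             raw = ls[11:].strip().upper()
--             if raw in ('DAILY', 'WEEKLY', 'MONTHLY'):
--                 chart_type = raw
--                 break
--
--     if not analysis:
--         if any('NOT FOUND' in line.upper() for line in lines):
--             return "NOT FOUND", "DAILY"
--         analysis = result
--
--     return analysis, chart_type
-- ===== Notes on version B (the rewrite author's own statement) =====
-- stated objective: alternative
-- what changed: A's forward fold with last-match-wins overwrites plus a conditional second scan is replaced by backward early-exit searches: the first ANALYSIS/valid CHART_TYPE match over the reversed lines (found once each, then break) and an any() over the lines for the sentinel.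
import Mathlib
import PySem

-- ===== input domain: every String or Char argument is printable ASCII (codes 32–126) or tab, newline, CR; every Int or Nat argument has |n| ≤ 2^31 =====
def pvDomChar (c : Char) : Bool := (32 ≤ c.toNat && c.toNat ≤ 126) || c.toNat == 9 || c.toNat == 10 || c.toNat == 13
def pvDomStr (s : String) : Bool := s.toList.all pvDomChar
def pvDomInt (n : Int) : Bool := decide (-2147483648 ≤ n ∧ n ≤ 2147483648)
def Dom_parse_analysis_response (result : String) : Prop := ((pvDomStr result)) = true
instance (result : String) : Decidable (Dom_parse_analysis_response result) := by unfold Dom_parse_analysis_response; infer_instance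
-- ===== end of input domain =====

-- B replaces A's forward overwrite-fold plus conditional second scan by backward early-exit searches (first match over the reversed lines) and an any-scan; alternative decomposition, same cost.


-- ===== PORT A =====
-- one step of A's first `for line in lines` loop, state = (analysis, chart_type)
def pvAStep (st : List Char × List Char) (line : List Char) : List Char × List Char :=
  let ls := PySem.Chars.strip line
  if PySem.Chars.startswith (PySem.Chars.upper ls) "ANALYSIS:".toList then
    (PySem.Chars.strip (PySem.Chars.slice ls (some 9) none), st.2)
  else if PySem.Chars.startswith (PySem.Chars.upper ls) "CHART_TYPE:".toList then
    let raw := PySem.Chars.upper (PySem.Chars.strip (PySem.Chars.slice ls (some 11) none))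
    if raw ∈ ["DAILY".toList, "WEEKLY".toList, "MONTHLY".toList] then (st.1, raw) else st
  else st

-- A's second loop: early-return scan `for line in lines: if 'NOT FOUND' in line.upper(): return …`
def pvANotFoundScan : List (List Char) → Bool
  | [] => false
  | line :: rest =>
    if PySem.Chars.isIn "NOT FOUND".toList (PySem.Chars.upper line) then true
    else pvANotFoundScan rest

def parse_analysis_response (result : String) : String × String :=
  let lines := PySem.Chars.splitOn result.toList ['\n']
  let st := lines.foldl pvAStep ([], "DAILY".toList)
  if st.1 = [] then
    if pvANotFoundScan lines then ("NOT FOUND", "DAILY")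
    else (result, String.ofList st.2)
  else (String.ofList st.1, String.ofList st.2)

-- ===== PORT B =====
-- B's first backward loop: first ANALYSIS: match (with break), over the reversed lines
def pvFindAnalysis : List (List Char) → Option (List Char)
  | [] => none
  | line :: rest =>
    let ls := PySem.Chars.strip line
    if PySem.Chars.startswith (PySem.Chars.upper ls) "ANALYSIS:".toList then
      some (PySem.Chars.strip (PySem.Chars.slice ls (some 9) none))
    else pvFindAnalysis rest

-- B's second backward loop: first valid CHART_TYPE: match (with break)
def pvFindChart : List (List Char) → Option (List Char)
  | [] => none
  | line :: rest =>
    let ls := PySem.Chars.strip line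
    if PySem.Chars.startswith (PySem.Chars.upper ls) "CHART_TYPE:".toList then
      let raw := PySem.Chars.upper (PySem.Chars.strip (PySem.Chars.slice ls (some 11) none))
      if raw ∈ ["DAILY".toList, "WEEKLY".toList, "MONTHLY".toList] then some raw
      else pvFindChart rest
    else pvFindChart rest

def parse_analysis_response_alt (result : String) : String × String :=
  let lines := PySem.Chars.splitOn result.toList ['\n']
  let analysis := (pvFindAnalysis lines.reverse).getD []
  let chart_type := (pvFindChart lines.reverse).getD "DAILY".toList
  if analysis = [] then
    if lines.any (fun line => PySem.Chars.isIn "NOT FOUND".toList (PySem.Chars.upper line)) then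
      ("NOT FOUND", "DAILY")
    else (result, String.ofList chart_type)
  else (String.ofList analysis, String.ofList chart_type)

-- ===== PRECONDITION & SPEC =====
def Spec_parse_analysis_response (result : String) (out : String × String) : Prop := out = parse_analysis_response_alt result
instance (result : String) (out : String × String) : Decidable (Spec_parse_analysis_response result out) := by unfold Spec_parse_analysis_response; infer_instance

-- ===== CLAIM (what is proved, stated in full; the proofs are below) =====
def Claim_equal_parse_analysis_response : Prop := ∀ (result : String), Dom_parse_analysis_response result → Spec_parse_analysis_response result (parse_analysis_response result)

-- ===== LEMMAS AND PROOFS =====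

-- what a single line contributes to A's state, componentwise
def pvCheckA (line : List Char) : Option (List Char) :=
  let ls := PySem.Chars.strip line
  if PySem.Chars.startswith (PySem.Chars.upper ls) "ANALYSIS:".toList then
    some (PySem.Chars.strip (PySem.Chars.slice ls (some 9) none))
  else none

def pvCheckC (line : List Char) : Option (List Char) :=
  let ls := PySem.Chars.strip line
  if PySem.Chars.startswith (PySem.Chars.upper ls) "ANALYSIS:".toList then none
  else if PySem.Chars.startswith (PySem.Chars.upper ls) "CHART_TYPE:".toList then
    let raw := PySem.Chars.upper (PySem.Chars.strip (PySem.Chars.slice ls (some 11) none))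
    if raw ∈ ["DAILY".toList, "WEEKLY".toList, "MONTHLY".toList] then some raw else none
  else none

theorem pvAStep_eq (st : List Char × List Char) (line : List Char) :
    pvAStep st line = ((pvCheckA line).getD st.1, (pvCheckC line).getD st.2) := by
  simp only [pvAStep, pvCheckA, pvCheckC]
  split_ifs <;> rfl

theorem pvFindAnalysis_eq (ls : List (List Char)) : pvFindAnalysis ls = ls.findSome? pvCheckA := by
  induction ls with
  | nil => rfl
  | cons l rest ih =>
    simp only [pvFindAnalysis, pvCheckA, List.findSome?]
    split_ifs <;> simp [ih]

-- a line cannot start with both prefixes (they differ at their first character)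
theorem pvExcl {u : List Char}
    (h1 : PySem.Chars.startswith u "CHART_TYPE:".toList = true)
    (h2 : PySem.Chars.startswith u "ANALYSIS:".toList = true) : False := by
  rw [PySem.Chars.startswith_iff] at h1 h2
  obtain ⟨t1, e1⟩ := h1
  obtain ⟨t2, e2⟩ := h2
  rw [← e1] at e2
  simp at e2

-- pvCheckC without the (never-firing together) ANALYSIS guard
theorem pvCheckC_eq (line : List Char) :
    pvCheckC line =
      (if PySem.Chars.startswith (PySem.Chars.upper (PySem.Chars.strip line)) "CHART_TYPE:".toList then
        (if PySem.Chars.upper (PySem.Chars.strip (PySem.Chars.slice (PySem.Chars.strip line) (some 11) none)) ∈ ["DAILY".toList, "WEEKLY".toList, "MONTHLY".toList] then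
          some (PySem.Chars.upper (PySem.Chars.strip (PySem.Chars.slice (PySem.Chars.strip line) (some 11) none)))
        else none)
      else none) := by
  simp only [pvCheckC]
  split_ifs <;> first | rfl | exact (pvExcl ‹_› ‹_›).elim

theorem pvFindChart_eq (ls : List (List Char)) : pvFindChart ls = ls.findSome? pvCheckC := by
  induction ls with
  | nil => rfl
  | cons l rest ih =>
    simp only [pvFindChart, pvCheckC_eq, List.findSome?]
    split_ifs <;> simp [ih]

-- A's fold, componentwise, is the last contribution = first over the reversed list
theorem pvFold_eq (ls : List (List Char)) : ∀ (a c : List Char),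
    ls.foldl pvAStep (a, c)
      = ((ls.reverse.findSome? pvCheckA).getD a, (ls.reverse.findSome? pvCheckC).getD c) := by
  induction ls with
  | nil => intro a c; rfl
  | cons l rest ih =>
    intro a c
    simp only [List.foldl_cons, pvAStep_eq (a, c) l, ih, List.reverse_cons,
      List.findSome?_append]
    cases h1 : pvCheckA l <;> cases h2 : pvCheckC l <;>
      cases hA : List.findSome? pvCheckA rest.reverse <;>
        cases hC : List.findSome? pvCheckC rest.reverse <;>
          simp [h1, h2, hA, hC, List.findSome?]

theorem pvNotFound_eq (ls : List (List Char)) :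
    pvANotFoundScan ls
      = ls.any (fun line => PySem.Chars.isIn "NOT FOUND".toList (PySem.Chars.upper line)) := by
  induction ls with
  | nil => rfl
  | cons l rest ih =>
    rw [pvANotFoundScan, ih]
    simp only [List.any_cons]
    cases h : PySem.Chars.isIn "NOT FOUND".toList (PySem.Chars.upper l) <;> simp

-- ===== VERDICT (by name: the statement is the Claim_ definition above) =====
theorem parse_analysis_response_spec : Claim_equal_parse_analysis_response := by
  intro result _
  unfold Spec_parse_analysis_response parse_analysis_response parse_analysis_response_alt
  simp only [pvFold_eq, pvNotFound_eq, pvFindAnalysis_eq, pvFindChart_eq]
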